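-- pv_equiv track=rewrite | github.com/zzyu5/intent_ir | pipeline/triton/providers/flaggems/specs.py | _norm_groupnorm
-- ===== SOURCE A (Python) =====
-- from typing import Any, Dict, List
--
-- def _norm_groupnorm(shapes: Dict[str, int]) -> Dict[str, int]:
--     out = dict(shapes)
--     if "C" not in out:
--         return out
--     c = int(out["C"])
--     requested_g = int(out.get("num_groups", out.get("group", 1)))
--     requested_g = max(1, min(requested_g, max(1, c)))
--
--     divisors: List[int] = []
--     d = 1
--     while d * d <= max(1, c):
--         if c % d == 0:
--             divisors.append(d)
--             if d != c // d:
--                 divisors.append(c // d)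
--         d += 1
--     divisors = sorted(set(divisors))
--     best_g = min(divisors, key=lambda x: (abs(x - requested_g), -x))
--     out["num_groups"] = int(best_g)
--     out.pop("group", None)
--     out["group_size"] = c // int(best_g)
--     return out
-- ===== SOURCE B (Python) =====
-- def _norm_groupnorm(shapes):
--     out = dict(shapes)
--     if "C" not in out:
--         return out
--     c = int(out["C"])
--     g = int(out.get("num_groups", out.get("group", 1)))
--     g = max(1, min(g, max(1, c)))
--
--     # One pass over divisor pairs, keeping only the two bracketing candidates:
--     # lo = largest candidate <= g, hi = smallest candidate >= g.
--     lo = None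
--     hi = None
--     d = 1
--     while d * d <= max(1, c):
--         if c % d == 0:
--             for x in (d, c // d):
--                 if x <= g and (lo is None or lo < x):
--                     lo = x
--                 if x >= g and (hi is None or x < hi):
--                     hi = x
--         d += 1
--     # The best group count is one of the two brackets; ties go to the larger.
--     if hi is not None and (lo is None or hi - g <= g - lo):
--         best = hi
--     else:
--         best = lo
--
--     out["num_groups"] = best
--     out.pop("group", None)
--     out["group_size"] = c // best
--     return out
-- ===== Notes on version B (the rewrite author's own statement) =====
-- stated objective: alternative
-- what changed: Instead of materializing the divisor list, deduplicating and sorting it and taking min with a tuple key, B makes a single pass over the divisor pairs keeping only the two bracketing candidates (largest divisor <= g, smallest >= g) and picks the answer with one final two-way comparison (ties to the larger).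
import Mathlib
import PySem

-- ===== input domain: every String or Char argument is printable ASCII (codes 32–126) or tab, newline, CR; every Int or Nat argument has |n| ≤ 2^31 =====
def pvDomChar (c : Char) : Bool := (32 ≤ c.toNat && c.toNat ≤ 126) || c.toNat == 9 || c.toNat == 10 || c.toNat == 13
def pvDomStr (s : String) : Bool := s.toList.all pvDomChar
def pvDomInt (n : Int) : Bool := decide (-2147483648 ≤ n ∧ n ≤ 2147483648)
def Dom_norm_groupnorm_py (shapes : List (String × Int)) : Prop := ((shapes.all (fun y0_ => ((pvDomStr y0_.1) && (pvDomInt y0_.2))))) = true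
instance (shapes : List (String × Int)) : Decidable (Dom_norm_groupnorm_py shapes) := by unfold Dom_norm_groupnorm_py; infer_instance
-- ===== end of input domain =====

-- B replaces A's build-divisor-list / sorted(set(...)) / min-with-tuple-key pipeline by a single
-- pass that maintains only the two bracketing candidates (largest divisor ≤ g, smallest ≥ g)
-- and a final two-way comparison (objective: alternative, same O(√c) cost without list/set/sort).

-- ===== PORT A =====
-- while d * d <= max(1, c): if c % d == 0: append d; if d != c // d: append c // d; d += 1
-- (fuel (max 1 c).toNat + 1 is enough: the guard d*d ≤ max 1 c fails at latest at d = max 1 c + 1)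
def pvDivLoop (c : Int) : Nat → Int → List Int → List Int
  | 0, _, acc => acc
  | fuel+1, d, acc =>
    if d * d ≤ max 1 c then
      pvDivLoop c fuel (d + 1)
        (if PySem.Int.mod c d == 0 then
           acc ++ [d] ++ (if d ≠ PySem.Int.floordiv c d then [PySem.Int.floordiv c d] else [])
         else acc)
    else acc

-- divisors = sorted(set(divisors)); best_g = min(divisors, key=lambda x: (abs(x - g), -x))
-- (the list provably contains 1, so Python's min never sees an empty list; .getD 1 is unreachable)
def pvBestA (c g : Int) : Int :=
  let divisors := pvDivLoop c ((max 1 c).toNat + 1) 1 []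
  let divisors := PySem.List.sorted (PySem.Set.ofList divisors) (fun x => x) false
  (PySem.List.min2? divisors (fun x => |x - g|) (fun x => -x)).getD 1

def norm_groupnorm_py (shapes : List (String × Int)) : List (String × Int) :=
  let out := PySem.Dict.mk shapes
  if (out.contains "C") = false then out.items
  else
    -- out["C"]: the key is present (contains was checked), so get? is some; the default is unreachable
    let c := (out.get? "C").getD 0
    let rq := out.getD "num_groups" (out.getD "group" 1)
    let g := max 1 (min rq (max 1 c))
    let best := pvBestA c g
    (((out.insert "num_groups" best).erase "group").insert "group_size" (PySem.Int.floordiv c best)).items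

-- ===== PORT B =====
-- if x <= g and (lo is None or lo < x): lo = x ;  if x >= g and (hi is None or x < hi): hi = x
def pvUpd (g : Int) (st : Option Int × Option Int) (x : Int) : Option Int × Option Int :=
  (match st.1 with
   | none => if x ≤ g then some x else none
   | some l => if x ≤ g ∧ l < x then some x else some l,
   match st.2 with
   | none => if g ≤ x then some x else none
   | some h => if g ≤ x ∧ x < h then some x else some h)

-- while d * d <= max(1, c): if c % d == 0: for x in (d, c // d): update (lo, hi); d += 1
def pvBrLoop (c g : Int) : Nat → Int → Option Int × Option Int → Option Int × Option Int
  | 0, _, st => st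
  | fuel+1, d, st =>
    if d * d ≤ max 1 c then
      pvBrLoop c g fuel (d + 1)
        (if PySem.Int.mod c d == 0 then pvUpd g (pvUpd g st d) (PySem.Int.floordiv c d) else st)
    else st

-- best = hi if (hi is not None and (lo is None or hi - g <= g - lo)) else lo
-- (lo is provably never None — the candidate 1 always qualifies — so the .getD 1 is unreachable)
def pvBestB (c g : Int) : Int :=
  match pvBrLoop c g ((max 1 c).toNat + 1) 1 (none, none) with
  | (some l, some h) => if h - g ≤ g - l then h else l
  | (none, some h) => h
  | (lo, none) => lo.getD 1

def norm_groupnorm_py_alt (shapes : List (String × Int)) : List (String × Int) :=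
  let out := PySem.Dict.mk shapes
  if (out.contains "C") = false then out.items
  else
    -- out["C"]: the key is present (contains was checked), so get? is some; the default is unreachable
    let c := (out.get? "C").getD 0
    let rq := out.getD "num_groups" (out.getD "group" 1)
    let g := max 1 (min rq (max 1 c))
    let best := pvBestB c g
    (((out.insert "num_groups" best).erase "group").insert "group_size" (PySem.Int.floordiv c best)).items

-- ===== PRECONDITION & SPEC =====
def Spec_norm_groupnorm_py (shapes : List (String × Int)) (out : List (String × Int)) : Prop := out = norm_groupnorm_py_alt shapes
instance (shapes : List (String × Int)) (out : List (String × Int)) : Decidable (Spec_norm_groupnorm_py shapes out) := by unfold Spec_norm_groupnorm_py; infer_instance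

-- ===== CLAIM (what is proved, stated in full; the proofs are below) =====
def Claim_equal_norm_groupnorm_py : Prop := ∀ (shapes : List (String × Int)), Dom_norm_groupnorm_py shapes → Spec_norm_groupnorm_py shapes (norm_groupnorm_py shapes)

-- ===== LEMMAS AND PROOFS =====

-- lo (resp. hi) is exactly the largest element ≤ g (smallest ≥ g) of the candidate list acc
def PvIsLo (g : Int) (acc : List Int) (lo : Option Int) : Prop :=
  match lo with
  | none => ∀ x ∈ acc, ¬ x ≤ g
  | some l => l ∈ acc ∧ l ≤ g ∧ ∀ x ∈ acc, x ≤ g → x ≤ l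

def PvIsHi (g : Int) (acc : List Int) (hi : Option Int) : Prop :=
  match hi with
  | none => ∀ x ∈ acc, ¬ g ≤ x
  | some h => h ∈ acc ∧ g ≤ h ∧ ∀ x ∈ acc, g ≤ x → h ≤ x

theorem pvIsLo_upd (g x : Int) (acc : List Int) (st : Option Int × Option Int)
    (h : PvIsLo g acc st.1) : PvIsLo g (acc ++ [x]) (pvUpd g st x).1 := by
  rcases st with ⟨lo, hi⟩
  rcases lo with _ | l
  · simp only [PvIsLo] at h
    show PvIsLo g (acc ++ [x]) (if x ≤ g then some x else none)
    split_ifs with hx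
    · simp only [PvIsLo]
      refine ⟨List.mem_append_right _ (List.mem_singleton_self x), hx, ?_⟩
      intro y hy hyg
      rcases List.mem_append.mp hy with h1 | h1
      · exact absurd hyg (h y h1)
      · have := List.mem_singleton.mp h1; omega
    · simp only [PvIsLo]
      intro y hy
      rcases List.mem_append.mp hy with h1 | h1
      · exact h y h1
      · have := List.mem_singleton.mp h1; omega
  · simp only [PvIsLo] at h
    obtain ⟨hmem, hle, hmax⟩ := h
    show PvIsLo g (acc ++ [x]) (if x ≤ g ∧ l < x then some x else some l)
    split_ifs with hx
    · simp only [PvIsLo]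
      refine ⟨List.mem_append_right _ (List.mem_singleton_self x), hx.1, ?_⟩
      intro y hy hyg
      rcases List.mem_append.mp hy with h1 | h1
      · have := hmax y h1 hyg; omega
      · have := List.mem_singleton.mp h1; omega
    · simp only [PvIsLo]
      refine ⟨List.mem_append_left _ hmem, hle, ?_⟩
      intro y hy hyg
      rcases List.mem_append.mp hy with h1 | h1
      · exact hmax y h1 hyg
      · have := List.mem_singleton.mp h1
        omega

theorem pvIsLo_upd_mem (g x : Int) (acc : List Int) (st : Option Int × Option Int)
    (hx : x ∈ acc) (h : PvIsLo g acc st.1) : PvIsLo g acc (pvUpd g st x).1 := by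
  rcases st with ⟨lo, hi⟩
  rcases lo with _ | l
  · simp only [PvIsLo] at h
    show PvIsLo g acc (if x ≤ g then some x else none)
    split_ifs with hxg
    · exact absurd hxg (h x hx)
    · simp only [PvIsLo]; exact h
  · simp only [PvIsLo] at h
    obtain ⟨hmem, hle, hmax⟩ := h
    show PvIsLo g acc (if x ≤ g ∧ l < x then some x else some l)
    split_ifs with hc
    · simp only [PvIsLo]
      refine ⟨hx, hc.1, ?_⟩
      intro y hy hyg
      have := hmax y hy hyg; omega
    · simp only [PvIsLo]
      exact ⟨hmem, hle, hmax⟩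

theorem pvIsHi_upd (g x : Int) (acc : List Int) (st : Option Int × Option Int)
    (h : PvIsHi g acc st.2) : PvIsHi g (acc ++ [x]) (pvUpd g st x).2 := by
  rcases st with ⟨lo, hi⟩
  rcases hi with _ | hh
  · simp only [PvIsHi] at h
    show PvIsHi g (acc ++ [x]) (if g ≤ x then some x else none)
    split_ifs with hx
    · simp only [PvIsHi]
      refine ⟨List.mem_append_right _ (List.mem_singleton_self x), hx, ?_⟩
      intro y hy hyg
      rcases List.mem_append.mp hy with h1 | h1
      · exact absurd hyg (h y h1)
      · have := List.mem_singleton.mp h1; omega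
    · simp only [PvIsHi]
      intro y hy
      rcases List.mem_append.mp hy with h1 | h1
      · exact h y h1
      · have := List.mem_singleton.mp h1; omega
  · simp only [PvIsHi] at h
    obtain ⟨hmem, hle, hmin⟩ := h
    show PvIsHi g (acc ++ [x]) (if g ≤ x ∧ x < hh then some x else some hh)
    split_ifs with hx
    · simp only [PvIsHi]
      refine ⟨List.mem_append_right _ (List.mem_singleton_self x), hx.1, ?_⟩
      intro y hy hyg
      rcases List.mem_append.mp hy with h1 | h1
      · have := hmin y h1 hyg; omega
      · have := List.mem_singleton.mp h1; omega
    · simp only [PvIsHi]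
      refine ⟨List.mem_append_left _ hmem, hle, ?_⟩
      intro y hy hyg
      rcases List.mem_append.mp hy with h1 | h1
      · exact hmin y h1 hyg
      · have := List.mem_singleton.mp h1
        omega

theorem pvIsHi_upd_mem (g x : Int) (acc : List Int) (st : Option Int × Option Int)
    (hx : x ∈ acc) (h : PvIsHi g acc st.2) : PvIsHi g acc (pvUpd g st x).2 := by
  rcases st with ⟨lo, hi⟩
  rcases hi with _ | hh
  · simp only [PvIsHi] at h
    show PvIsHi g acc (if g ≤ x then some x else none)
    split_ifs with hxg
    · exact absurd hxg (h x hx)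
    · simp only [PvIsHi]; exact h
  · simp only [PvIsHi] at h
    obtain ⟨hmem, hle, hmin⟩ := h
    show PvIsHi g acc (if g ≤ x ∧ x < hh then some x else some hh)
    split_ifs with hc
    · simp only [PvIsHi]
      refine ⟨hx, hc.1, ?_⟩
      intro y hy hyg
      have := hmin y hy hyg; omega
    · simp only [PvIsHi]
      exact ⟨hmem, hle, hmin⟩

-- the two loops run in lockstep: B's state brackets A's accumulated candidate list
theorem pvLoop_inv (c g : Int) : ∀ (fuel : Nat) (d : Int) (acc : List Int) (st : Option Int × Option Int),
    PvIsLo g acc st.1 → PvIsHi g acc st.2 →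
    PvIsLo g (pvDivLoop c fuel d acc) (pvBrLoop c g fuel d st).1 ∧
    PvIsHi g (pvDivLoop c fuel d acc) (pvBrLoop c g fuel d st).2 := by
  intro fuel
  induction fuel with
  | zero => intro d acc st h1 h2; exact ⟨h1, h2⟩
  | succ n ih =>
    intro d acc st h1 h2
    by_cases hg : d * d ≤ max 1 c
    · simp only [pvDivLoop, pvBrLoop, if_pos hg]
      by_cases hm : (PySem.Int.mod c d == 0) = true
      · simp only [hm, if_true]
        by_cases hd : d ≠ PySem.Int.floordiv c d
        · simp only [if_pos hd]
          exact ih (d + 1) (acc ++ [d] ++ [PySem.Int.floordiv c d])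
            (pvUpd g (pvUpd g st d) (PySem.Int.floordiv c d))
            (pvIsLo_upd g (PySem.Int.floordiv c d) (acc ++ [d]) (pvUpd g st d)
              (pvIsLo_upd g d acc st h1))
            (pvIsHi_upd g (PySem.Int.floordiv c d) (acc ++ [d]) (pvUpd g st d)
              (pvIsHi_upd g d acc st h2))
        · replace hd : d = PySem.Int.floordiv c d := not_not.mp hd
          have hcond : ¬ (d ≠ PySem.Int.floordiv c d) := fun hh => hh hd
          simp only [if_neg hcond, List.append_nil]
          refine ih (d + 1) (acc ++ [d]) (pvUpd g (pvUpd g st d) (PySem.Int.floordiv c d)) ?_ ?_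
          · rw [← hd]
            exact pvIsLo_upd_mem g d (acc ++ [d]) (pvUpd g st d)
              (List.mem_append_right _ (List.mem_singleton_self d)) (pvIsLo_upd g d acc st h1)
          · rw [← hd]
            exact pvIsHi_upd_mem g d (acc ++ [d]) (pvUpd g st d)
              (List.mem_append_right _ (List.mem_singleton_self d)) (pvIsHi_upd g d acc st h2)
      · rw [Bool.not_eq_true] at hm
        simp only [hm]
        exact ih (d + 1) acc st h1 h2
    · simp only [pvDivLoop, pvBrLoop, if_neg hg]
      exact ⟨h1, h2⟩

theorem pvDivLoop_mono (c : Int) : ∀ (fuel : Nat) (d : Int) (acc : List Int) (a : Int),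
    a ∈ acc → a ∈ pvDivLoop c fuel d acc := by
  intro fuel
  induction fuel with
  | zero => intro d acc a ha; exact ha
  | succ n ih =>
    intro d acc a ha
    by_cases hg : d * d ≤ max 1 c
    · simp only [pvDivLoop, if_pos hg]
      apply ih
      split_ifs <;> simp [ha]
    · simp only [pvDivLoop, if_neg hg]
      exact ha

theorem pvDivLoop_first (c : Int) : pvDivLoop c ((max 1 c).toNat + 1) 1 [] =
    pvDivLoop c (max 1 c).toNat 2
      ([1] ++ (if (1 : Int) ≠ PySem.Int.floordiv c 1 then [PySem.Int.floordiv c 1] else [])) := by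
  have hmod : PySem.Int.mod c 1 = 0 := (PySem.Int.mod_eq_zero_iff_dvd c 1).mpr (one_dvd c)
  have hguard : (1 : Int) * 1 ≤ max 1 c := by
    have := le_max_left (1 : Int) c; omega
  simp only [pvDivLoop, if_pos hguard, hmod]
  norm_num

theorem pvOne_mem (c : Int) : (1 : Int) ∈ pvDivLoop c ((max 1 c).toNat + 1) 1 [] := by
  rw [pvDivLoop_first]
  apply pvDivLoop_mono
  exact List.mem_append_left _ (List.mem_singleton_self 1)

theorem pvEx_ge (c g : Int) (hgm : g ≤ max 1 c) :
    ∃ x ∈ pvDivLoop c ((max 1 c).toNat + 1) 1 [], g ≤ x := by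
  by_cases hc : c ≤ 1
  · refine ⟨1, pvOne_mem c, ?_⟩
    have : max 1 c = 1 := max_eq_left (by omega)
    omega
  · have hf1 : PySem.Int.floordiv c 1 = c := by
      rw [PySem.Int.floordiv_eq_ediv_of_pos (by norm_num)]
      exact Int.ediv_one c
    refine ⟨c, ?_, ?_⟩
    · rw [pvDivLoop_first, hf1]
      apply pvDivLoop_mono
      rw [if_pos (by omega : (1 : Int) ≠ c)]
      exact List.mem_append_right _ (List.mem_singleton_self c)
    · have : max 1 c = c := max_eq_right (by omega)
      omega

-- first-extremal step of min2? (exactly PySem.List.min2?'s fold function)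
def pvMinStep (k1 k2 : Int → Int) (acc : Option Int) (x : Int) : Option Int :=
  match acc with
  | none => some x
  | some m =>
    if (decide (k1 x < k1 m) || !decide (k1 m < k1 x) && decide (k2 x < k2 m)) = true then some x
    else some m

theorem pvMin2?_eq_foldl (xs : List Int) (k1 k2 : Int → Int) :
    PySem.List.min2? xs k1 k2 = xs.foldl (pvMinStep k1 k2) none := by
  unfold PySem.List.min2?
  congr 1
  funext acc x
  cases acc <;> rfl

theorem pvMin_aux (k1 k2 : Int → Int) : ∀ (xs : List Int) (a : Int),
    ∃ m, xs.foldl (pvMinStep k1 k2) (some a) = some m ∧ (m = a ∨ m ∈ xs) ∧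
      (k1 m < k1 a ∨ (k1 m = k1 a ∧ k2 m ≤ k2 a)) ∧
      ∀ y ∈ xs, k1 m < k1 y ∨ (k1 m = k1 y ∧ k2 m ≤ k2 y) := by
  intro xs
  induction xs with
  | nil =>
    intro a
    exact ⟨a, rfl, Or.inl rfl, Or.inr ⟨rfl, le_refl _⟩, by simp⟩
  | cons x t ih =>
    intro a
    by_cases hc : (decide (k1 x < k1 a) || !decide (k1 a < k1 x) && decide (k2 x < k2 a)) = true
    · have hstep : pvMinStep k1 k2 (some a) x = some x := by simp only [pvMinStep, if_pos hc]
      simp only [List.foldl_cons, hstep]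
      obtain ⟨m, hm, hmem, hrel, hmin⟩ := ih x
      simp only [Bool.or_eq_true, Bool.and_eq_true, Bool.not_eq_true', decide_eq_true_eq,
        decide_eq_false_iff_not] at hc
      refine ⟨m, hm, ?_, ?_, ?_⟩
      · rcases hmem with rfl | hmem
        · exact Or.inr List.mem_cons_self
        · exact Or.inr (List.mem_cons_of_mem _ hmem)
      · rcases hrel with h1 | ⟨h1, h1'⟩ <;> rcases hc with h2 | ⟨h2, h2'⟩ <;> omega
      · intro y hy
        rcases List.mem_cons.mp hy with rfl | hyt
        · exact hrel
        · exact hmin y hyt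
    · have hstep : pvMinStep k1 k2 (some a) x = some a := by simp only [pvMinStep, if_neg hc]
      simp only [List.foldl_cons, hstep]
      obtain ⟨m, hm, hmem, hrel, hmin⟩ := ih a
      simp only [Bool.or_eq_true, Bool.and_eq_true, Bool.not_eq_true', decide_eq_true_eq,
        decide_eq_false_iff_not, not_or, not_and, not_lt] at hc
      refine ⟨m, hm, ?_, hrel, ?_⟩
      · rcases hmem with rfl | hmem
        · exact Or.inl rfl
        · exact Or.inr (List.mem_cons_of_mem _ hmem)
      · intro y hy
        rcases List.mem_cons.mp hy with hEq | hyt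
        · have hgoal : k1 m < k1 x ∨ (k1 m = k1 x ∧ k2 m ≤ k2 x) := by
            rcases hrel with h1 | ⟨h1, h1'⟩
            · omega
            · by_cases hq : k1 a < k1 x
              · omega
              · have := hc.2 (by omega)
                omega
          rw [hEq]
          exact hgoal
        · exact hmin y hyt
    

theorem pvMin2?_spec (xs : List Int) (k1 k2 : Int → Int) (hne : xs ≠ []) :
    ∃ m, PySem.List.min2? xs k1 k2 = some m ∧ m ∈ xs ∧
      ∀ y ∈ xs, k1 m < k1 y ∨ (k1 m = k1 y ∧ k2 m ≤ k2 y) := by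
  rcases xs with _ | ⟨x, t⟩
  · exact absurd rfl hne
  · rw [pvMin2?_eq_foldl]
    have hstep : pvMinStep k1 k2 none x = some x := rfl
    simp only [List.foldl_cons, hstep]
    obtain ⟨m, hm, hmem, hrel, hmin⟩ := pvMin_aux k1 k2 t x
    refine ⟨m, hm, ?_, ?_⟩
    · rcases hmem with rfl | hmem
      · exact List.mem_cons_self
      · exact List.mem_cons_of_mem _ hmem
    · intro y hy
      rcases List.mem_cons.mp hy with rfl | hyt
      · exact hrel
      · exact hmin y hyt

theorem pvBest_eq (c rq : Int) :
    pvBestA c (max 1 (min rq (max 1 c))) = pvBestB c (max 1 (min rq (max 1 c))) := by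
  set g := max 1 (min rq (max 1 c)) with hgdef
  have hg1 : 1 ≤ g := le_max_left _ _
  have hgm : g ≤ max 1 c := max_le (le_max_left 1 c) (min_le_right rq (max 1 c))
  set L := pvDivLoop c ((max 1 c).toNat + 1) 1 [] with hL
  set st := pvBrLoop c g ((max 1 c).toNat + 1) 1 (none, none) with hst
  have hinv := pvLoop_inv c g ((max 1 c).toNat + 1) 1 [] (none, none)
    (by simp [PvIsLo]) (by simp [PvIsHi])
  obtain ⟨hLo, hHi⟩ := hinv
  have h1L : (1 : Int) ∈ L := pvOne_mem c
  obtain ⟨xg, hxgL, hxgge⟩ := pvEx_ge c g hgm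
  rcases hlo : st.1 with _ | l
  · rw [hlo] at hLo
    simp only [PvIsLo] at hLo
    exact absurd hg1 (hLo 1 h1L)
  rcases hhi : st.2 with _ | h
  · rw [hhi] at hHi
    simp only [PvIsHi] at hHi
    exact absurd hxgge (hHi xg hxgL)
  rw [hlo] at hLo
  rw [hhi] at hHi
  simp only [PvIsLo] at hLo
  simp only [PvIsHi] at hHi
  obtain ⟨hlL, hlg, hlmax⟩ := hLo
  obtain ⟨hhL, hhg, hhmin⟩ := hHi
  have hpair : st = (some l, some h) := Prod.ext hlo hhi
  have hB : pvBestB c g = if h - g ≤ g - l then h else l := by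
    unfold pvBestB
    rw [← hst, hpair]
  have hmemLS : ∀ y : Int,
      y ∈ PySem.List.sorted (PySem.Set.ofList L) (fun x => x) false ↔ y ∈ L := by
    intro y
    rw [PySem.List.mem_sorted, PySem.Set.mem_ofList]
  have hne : PySem.List.sorted (PySem.Set.ofList L) (fun x => x) false ≠ [] := by
    intro h0
    have := (hmemLS 1).mpr h1L
    rw [h0] at this
    simp at this
  obtain ⟨m, hmeq, hmmem, hmmin⟩ :=
    pvMin2?_spec (PySem.List.sorted (PySem.Set.ofList L) (fun x => x) false)
      (fun x => |x - g|) (fun x => -x) hne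
  have hA0 : pvBestA c g =
      (PySem.List.min2? (PySem.List.sorted (PySem.Set.ofList L) (fun x => x) false)
        (fun x => |x - g|) (fun x => -x)).getD 1 := by
    rw [hL]
    rfl
  have hA : pvBestA c g = m := by
    rw [hA0, hmeq]
    rfl
  have hmL : m ∈ L := (hmemLS m).mp hmmem
  by_cases hcase : h - g ≤ g - l
  · have hbmin : ∀ y ∈ L, |h - g| < |y - g| ∨ (|h - g| = |y - g| ∧ -h ≤ -y) := by
      intro y hyL
      have hhabs : |h - g| = h - g := abs_of_nonneg (by omega)
      rcases le_total y g with hyg | hgy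
      · have hyl := hlmax y hyL hyg
        have hyabs : |y - g| = g - y := by
          rw [abs_sub_comm]
          exact abs_of_nonneg (by omega)
        rw [hhabs, hyabs]
        omega
      · have hhy := hhmin y hyL hgy
        have hyabs : |y - g| = y - g := abs_of_nonneg (by omega)
        rw [hhabs, hyabs]
        omega
    have h1' : |m - g| < |h - g| ∨ (|m - g| = |h - g| ∧ -m ≤ -h) :=
      hmmin h ((hmemLS h).mpr hhL)
    have h2' := hbmin m hmL
    have hmh : m = h := by
      generalize hA1 : |m - g| = A at h1' h2'
      generalize hA2 : |h - g| = B at h1' h2'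
      rcases h1' with h1' | ⟨h1', h1''⟩ <;> rcases h2' with h2' | ⟨h2', h2''⟩ <;> omega
    rw [hA, hB, if_pos hcase, hmh]
  · have hbmin : ∀ y ∈ L, |l - g| < |y - g| ∨ (|l - g| = |y - g| ∧ -l ≤ -y) := by
      intro y hyL
      have hlabs : |l - g| = g - l := by
        rw [abs_sub_comm]
        exact abs_of_nonneg (by omega)
      rcases le_total y g with hyg | hgy
      · have hyl := hlmax y hyL hyg
        have hyabs : |y - g| = g - y := by
          rw [abs_sub_comm]
          exact abs_of_nonneg (by omega)
        rw [hlabs, hyabs]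
        omega
      · have hhy := hhmin y hyL hgy
        have hyabs : |y - g| = y - g := abs_of_nonneg (by omega)
        rw [hlabs, hyabs]
        omega
    have h1' : |m - g| < |l - g| ∨ (|m - g| = |l - g| ∧ -m ≤ -l) :=
      hmmin l ((hmemLS l).mpr hlL)
    have h2' := hbmin m hmL
    have hml : m = l := by
      generalize hA1 : |m - g| = A at h1' h2'
      generalize hA2 : |l - g| = B at h1' h2'
      rcases h1' with h1' | ⟨h1', h1''⟩ <;> rcases h2' with h2' | ⟨h2', h2''⟩ <;> omega
    rw [hA, hB, if_neg hcase, hml]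

-- ===== VERDICT (by name: the statement is the Claim_ definition above) =====
theorem norm_groupnorm_py_spec : Claim_equal_norm_groupnorm_py := by
  intro shapes _
  show norm_groupnorm_py shapes = norm_groupnorm_py_alt shapes
  unfold norm_groupnorm_py norm_groupnorm_py_alt
  by_cases hC : ((PySem.Dict.mk shapes).contains "C") = false
  · simp only [hC, if_true]
  · simp only [hC, pvBest_eq]
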